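-- pv_equiv track=rewrite | github.com/Semeriuss/A2SV-Labs | contest_problems/code_forces_13/teamComposition.py | teamComposition
-- ===== SOURCE A (Python) =====
-- def teamComposition(mathematician, programmer):
--     a, b = (mathematician, programmer) if mathematician <= programmer else (programmer, mathematician)
--     count = 0
--     while a > 0 and b > 2:
--         a -= 1
--         b -= 3
--         a, b = (a, b) if a <= b else (b, a)
--         if a >= 0 and b >= 0:
--             count += 1
--
--     return count
-- ===== SOURCE B (Python) =====
-- def teamComposition(mathematician, programmer):
--     # Closed form: each team takes 1 from the smaller and 3 from the larger group,
--     # rebalancing; the greedy loop achieves min(m, p, (m+p)//4) except for a parity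
--     # correction when m+p is exactly 4*t and the remaining split is infeasible.
--     if mathematician < 0 or programmer < 0:
--         return 0
--     t = min(mathematician, programmer, (mathematician + programmer) // 4)
--     if 4 * t == mathematician + programmer and (3 * t - max(mathematician, programmer)) % 2 == 1:
--         t -= 1
--     return t
-- ===== Notes on version B (the rewrite author's own statement) =====
-- stated objective: faster
-- what changed: Replaces A's step-by-step greedy while loop (one iteration per team formed) with an O(1) closed form min(m,p,(m+p)//4) plus a parity correction.
import Mathlib
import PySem

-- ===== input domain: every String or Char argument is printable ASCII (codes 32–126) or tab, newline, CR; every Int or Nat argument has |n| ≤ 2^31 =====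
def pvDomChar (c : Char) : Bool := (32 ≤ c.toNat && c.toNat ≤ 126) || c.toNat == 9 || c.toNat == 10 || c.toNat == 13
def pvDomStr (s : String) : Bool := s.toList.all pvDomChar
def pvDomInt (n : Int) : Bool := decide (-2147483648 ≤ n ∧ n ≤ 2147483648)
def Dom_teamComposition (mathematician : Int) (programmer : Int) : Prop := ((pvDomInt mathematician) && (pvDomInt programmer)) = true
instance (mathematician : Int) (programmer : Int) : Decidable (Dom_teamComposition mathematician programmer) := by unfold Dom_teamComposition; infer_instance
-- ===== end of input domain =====

-- B replaces A's per-team greedy while loop by an O(1) closed form (min plus a parity correction); objective: faster.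


-- ===== PORT A =====
-- the while loop: state (a, b, count); each pass takes 1 from a, 3 from b, re-sorts, counts
def teamCompositionLoop (a b count : Int) : Int :=
  if 0 < a ∧ 2 < b then
    if a - 1 ≤ b - 3 then
      teamCompositionLoop (a - 1) (b - 3) (if 0 ≤ a - 1 ∧ 0 ≤ b - 3 then count + 1 else count)
    else
      teamCompositionLoop (b - 3) (a - 1) (if 0 ≤ b - 3 ∧ 0 ≤ a - 1 then count + 1 else count)
  else count
termination_by (a + b).toNat
decreasing_by all_goals omega

def teamComposition (mathematician : Int) (programmer : Int) : Int :=
  if mathematician ≤ programmer then teamCompositionLoop mathematician programmer 0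
  else teamCompositionLoop programmer mathematician 0

-- ===== PORT B =====
def teamComposition_alt (mathematician : Int) (programmer : Int) : Int :=
  -- t = min(mathematician, programmer, (mathematician+programmer)//4), inlined
  if mathematician < 0 ∨ programmer < 0 then 0
  else if 4 * min mathematician (min programmer (PySem.Int.floordiv (mathematician + programmer) 4)) = mathematician + programmer ∧
      PySem.Int.mod (3 * min mathematician (min programmer (PySem.Int.floordiv (mathematician + programmer) 4)) - max mathematician programmer) 2 = 1 then
    min mathematician (min programmer (PySem.Int.floordiv (mathematician + programmer) 4)) - 1
  else min mathematician (min programmer (PySem.Int.floordiv (mathematician + programmer) 4))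

-- ===== PRECONDITION & SPEC =====
def Spec_teamComposition (mathematician : Int) (programmer : Int) (out : Int) : Prop := out = teamComposition_alt mathematician programmer
instance (mathematician : Int) (programmer : Int) (out : Int) : Decidable (Spec_teamComposition mathematician programmer out) := by unfold Spec_teamComposition; infer_instance

-- ===== CLAIM (what is proved, stated in full; the proofs are below) =====
def Claim_equal_teamComposition : Prop := ∀ (mathematician : Int) (programmer : Int), Dom_teamComposition mathematician programmer → Spec_teamComposition mathematician programmer (teamComposition mathematician programmer)

-- ===== LEMMAS AND PROOFS =====

-- proof-side closed form for the sorted pair (a ≤ b), using Euclidean / and % (divisors positive)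
def pvG (a b : Int) : Int :=
  if a ≤ 0 then 0
  else if 4 * (if a ≤ (a + b) / 4 then a else (a + b) / 4) = a + b ∧
      (3 * (if a ≤ (a + b) / 4 then a else (a + b) / 4) - b) % 2 = 1 then
    (if a ≤ (a + b) / 4 then a else (a + b) / 4) - 1
  else (if a ≤ (a + b) / 4 then a else (a + b) / 4)

lemma pvG_step₁ (a b : Int) (ha : 0 < a) (hb : 2 < b) (h : a - 1 ≤ b - 3) :
    pvG a b = 1 + pvG (a - 1) (b - 3) := by
  unfold pvG
  have h1 : (a - 1 + (b - 3)) / 4 = (a + b) / 4 - 1 := by omega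
  rw [h1]
  split_ifs <;> omega

lemma pvG_step₂ (a b : Int) (ha : 0 < a) (hb : 2 < b) (hab : a ≤ b) (h : ¬ a - 1 ≤ b - 3) :
    pvG a b = 1 + pvG (b - 3) (a - 1) := by
  unfold pvG
  have h1 : (b - 3 + (a - 1)) / 4 = (a + b) / 4 - 1 := by omega
  rw [h1]
  split_ifs <;> omega

lemma pvG_zero (a b : Int) (hab : a ≤ b) (h : ¬ (0 < a ∧ 2 < b)) : pvG a b = 0 := by
  unfold pvG
  split_ifs <;> omega

theorem loop_eq (a b c : Int) (hab : a ≤ b) : teamCompositionLoop a b c = c + pvG a b := by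
  rw [teamCompositionLoop]
  split
  · rename_i h
    obtain ⟨ha, hb⟩ := h
    split
    · rename_i hle
      rw [loop_eq (a - 1) (b - 3) _ (by omega), if_pos (by omega),
        pvG_step₁ a b ha hb hle]
      ring
    · rename_i hgt
      rw [loop_eq (b - 3) (a - 1) _ (by omega), if_pos (by omega),
        pvG_step₂ a b ha hb hab hgt]
      ring
  · rename_i h
    rw [pvG_zero a b hab h]; ring
termination_by (a + b).toNat
decreasing_by all_goals omega

lemma alt_eq_pvG (m p : Int) :
    teamComposition_alt m p = if m ≤ p then pvG m p else pvG p m := by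
  unfold teamComposition_alt pvG
  rw [PySem.Int.floordiv_eq_ediv_of_pos (by omega : (0:Int) < 4),
    PySem.Int.mod_eq_emod_of_pos (by omega : (0:Int) < 2)]
  split_ifs <;> omega

-- ===== VERDICT (by name: the statement is the Claim_ definition above) =====
theorem teamComposition_spec : Claim_equal_teamComposition := by
  intro m p _
  unfold Spec_teamComposition teamComposition
  rw [alt_eq_pvG]
  split
  · rename_i h; rw [loop_eq m p 0 h]; ring
  · rename_i h; rw [loop_eq p m 0 (by omega)]; ring
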